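-- pv_equiv track=rewrite | github.com/hkevin01/java-to-python-test-suite | tests/unit/test_topological_sort.py | _deps_before
-- ===== SOURCE A (Python) =====
-- def _deps_before(result: list, node: str, deps: set) -> bool:
--     """Return True if every dep in deps appears before node in result."""
--     if node not in result:
--         return False
--     node_idx = result.index(node)
--     for dep in deps:
--         if dep in result and result.index(dep) >= node_idx:
--             return False
--     return True
-- ===== SOURCE B (Python) =====
-- def _deps_before(result: list, node: str, deps: set) -> bool:
--     """Return True if every dep in deps appears before node in result."""
--     remaining = set(deps)
--     for item in result:
--         if item == node:
--             break
--         remaining.discard(item)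
--     else:
--         return False
--     present = set(result)
--     return all(d not in present for d in remaining)
-- ===== Notes on version B (the rewrite author's own statement) =====
-- stated objective: alternative
-- what changed: Replaces A's membership test plus per-dep result.index scans against node's index with a single forward sweep of result up to node that discards seen items from a set of the deps, followed by one membership check of the leftover deps against set(result).
import Mathlib
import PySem

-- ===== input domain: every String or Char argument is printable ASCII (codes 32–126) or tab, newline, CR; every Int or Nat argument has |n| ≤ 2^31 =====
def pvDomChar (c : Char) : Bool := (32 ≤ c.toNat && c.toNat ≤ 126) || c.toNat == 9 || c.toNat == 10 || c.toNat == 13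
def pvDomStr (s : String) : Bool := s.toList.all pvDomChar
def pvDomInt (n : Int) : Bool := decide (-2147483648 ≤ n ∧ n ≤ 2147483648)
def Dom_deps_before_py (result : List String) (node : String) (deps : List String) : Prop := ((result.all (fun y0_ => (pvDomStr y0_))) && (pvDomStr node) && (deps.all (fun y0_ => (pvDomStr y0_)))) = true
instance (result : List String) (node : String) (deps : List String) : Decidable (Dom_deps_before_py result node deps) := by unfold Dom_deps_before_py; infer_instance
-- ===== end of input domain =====

-- B replaces A's per-dep `result.index` scans by one forward sweep of `result` up to `node`
-- (discarding seen elements from a set of the deps) plus one membership check — objective: alternative decomposition.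

-- ===== PORT A =====
-- the 'for dep in deps' loop of A (deps is a Python set; the Bool result is iteration-order independent)
def depsLoopA (result : List String) (nodeIdx : Nat) : List String → Bool
  | [] => true
  | d :: ds =>
      if result.contains d && decide (nodeIdx ≤ (PySem.List.index? result d).getD 0) then false
      else depsLoopA result nodeIdx ds

def deps_before_py (result : List String) (node : String) (deps : List String) : Bool :=
  if !(result.contains node) then false
  else depsLoopA result ((PySem.List.index? result node).getD 0) deps

-- ===== PORT B =====
-- the 'for item in result: … break / else: return False' sweep of B; none = the else branch
def sweepB (node : String) : List String → PySem.Set String → Option (PySem.Set String)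
  | [], _ => none
  | x :: xs, rem => if x == node then some rem else sweepB node xs (rem.discard x)

def deps_before_py_alt (result : List String) (node : String) (deps : List String) : Bool :=
  match sweepB node result (PySem.Set.ofList deps) with
  | none => false
  | some remaining =>
      let present := PySem.Set.ofList result
      remaining.all (fun d => !(present.contains d))

-- ===== PRECONDITION & SPEC =====
def Spec_deps_before_py (result : List String) (node : String) (deps : List String) (out : Bool) : Prop := out = deps_before_py_alt result node deps
instance (result : List String) (node : String) (deps : List String) (out : Bool) : Decidable (Spec_deps_before_py result node deps out) := by unfold Spec_deps_before_py; infer_instance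

-- ===== CLAIM (what is proved, stated in full; the proofs are below) =====
def Claim_equal_deps_before_py : Prop := ∀ (result : List String) (node : String) (deps : List String), Dom_deps_before_py result node deps → Spec_deps_before_py result node deps (deps_before_py result node deps)

-- ===== LEMMAS AND PROOFS =====

theorem sweepB_of_not_mem (node : String) (result : List String) (s : PySem.Set String)
    (h : node ∉ result) : sweepB node result s = none := by
  induction result generalizing s with
  | nil => rfl
  | cons x xs ih =>
      have h1 : (x == node) = false := beq_eq_false_iff_ne.mpr fun e => h (by simp [e])
      simp only [sweepB, h1, Bool.false_eq_true, if_false]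
      exact ih _ (fun hm => h (List.mem_cons_of_mem _ hm))

theorem sweepB_first (node : String) (pre suf : List String) (s : PySem.Set String)
    (h : node ∉ pre) :
    sweepB node (pre ++ node :: suf) s = some (pre.foldl PySem.Set.discard s) := by
  induction pre generalizing s with
  | nil => simp [sweepB]
  | cons x xs ih =>
      have h1 : (x == node) = false := beq_eq_false_iff_ne.mpr fun e => h (by simp [e])
      simp only [List.cons_append, sweepB, List.foldl_cons, h1, Bool.false_eq_true, if_false]
      exact ih _ (fun hm => h (List.mem_cons_of_mem _ hm))

theorem mem_foldl_discard (pre : List String) (s : PySem.Set String) (d : String) :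
    d ∈ pre.foldl PySem.Set.discard s ↔ d ∈ s ∧ d ∉ pre := by
  induction pre generalizing s with
  | nil => simp
  | cons x xs ih =>
      simp only [List.foldl_cons, ih, PySem.Set.mem_discard, List.mem_cons]
      tauto

theorem depsLoopA_eq_all (result : List String) (k : Nat) (deps : List String) :
    depsLoopA result k deps
      = deps.all (fun d => !(result.contains d && decide (k ≤ (PySem.List.index? result d).getD 0))) := by
  induction deps with
  | nil => rfl
  | cons d ds ih =>
      simp only [depsLoopA, List.all_cons, ih]
      cases hc : result.contains d && decide (k ≤ (PySem.List.index? result d).getD 0) with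
      | false => simp
      | true => simp

-- index? over an append whose left part misses the value
theorem index?_append_of_not_mem (pre t : List String) (d : String) (h : d ∉ pre) :
    PySem.List.index? (pre ++ t) d = (PySem.List.index? t d).map (· + pre.length) := by
  induction pre with
  | nil => simp
  | cons x xs ih =>
      rw [List.cons_append, PySem.List.index?_cons_of_ne _ (by simp_all [eq_comm]),
        ih (by simp_all)]
      cases PySem.List.index? t d with
      | none => simp
      | some m => simp; omega

theorem index?_lt_of_mem (pre : List String) (d : String) (h : d ∈ pre) :
    ∃ j, PySem.List.index? pre d = some j ∧ j < pre.length := by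
  obtain ⟨j, hj⟩ := Option.isSome_iff_exists.mp ((PySem.List.index?_isSome_iff pre d).mpr h)
  obtain ⟨p, s, hps, hlen, -⟩ := (PySem.List.index?_eq_some_iff pre d j).mp hj
  exact ⟨j, hj, by subst hps; simp [← hlen]⟩

theorem deps_before_eq (result : List String) (node : String) (deps : List String) :
    deps_before_py result node deps = deps_before_py_alt result node deps := by
  by_cases h : node ∈ result
  · -- node occurs: decompose result at node's first occurrence
    obtain ⟨k, hk⟩ := Option.isSome_iff_exists.mp
      ((PySem.List.index?_isSome_iff result node).mpr h)
    obtain ⟨pre, suf, hres, hlen, hpre⟩ := (PySem.List.index?_eq_some_iff result node k).mp hk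
    subst hres
    have hcont : (pre ++ node :: suf).contains node = true := by simpa using h
    simp only [deps_before_py, deps_before_py_alt, hcont, hk, Bool.not_true,
      Option.getD_some, sweepB_first node pre suf _ hpre, Bool.false_eq_true, if_false]
    rw [Bool.eq_iff_iff]
    simp only [depsLoopA_eq_all, List.all_eq_true]
    constructor
    · -- A's loop passes → every undiscarded dep is absent from (pre ++ node :: suf)
      intro hA d hd
      rw [mem_foldl_discard, PySem.Set.mem_ofList] at hd
      obtain ⟨hddeps, hdpre⟩ := hd
      simp only [Bool.not_eq_eq_eq_not, Bool.not_true]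
      by_contra hcon
      rcases Bool.eq_false_or_eq_true ((PySem.Set.ofList (pre ++ node :: suf)).contains d) with hc | hc
      swap
      · exact hcon hc
      have hdr : d ∈ pre ++ node :: suf :=
        (PySem.Set.mem_ofList _ d).mp ((PySem.Set.contains_iff _ d).mp hc)
      have hdt : d ∈ node :: suf := by
        rcases List.mem_append.mp hdr with h' | h'
        · exact absurd h' hdpre
        · exact h'
      obtain ⟨m, hm⟩ := Option.isSome_iff_exists.mp
        ((PySem.List.index?_isSome_iff (node :: suf) d).mpr hdt)
      have hidx : PySem.List.index? (pre ++ node :: suf) d = some (m + pre.length) := by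
        rw [index?_append_of_not_mem pre _ d hdpre, hm]; rfl
      have hA' := hA d hddeps
      rw [hidx] at hA'
      simp only [Option.getD_some, Bool.not_eq_eq_eq_not, Bool.not_true,
        Bool.and_eq_false_iff, ] at hA'
      rcases hA' with h' | h'
      · exact absurd hdr (by simp at h' ⊢; exact h')
      · have : ¬ k ≤ m + pre.length := by simpa using h'
        omega
    · -- B's check passes → A's loop passes
      intro hB d hddeps
      simp only [Bool.not_eq_eq_eq_not, Bool.not_true, Bool.and_eq_false_iff]
      by_cases hdpre : d ∈ pre
      · -- d appears before node: its index is < k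
        right
        obtain ⟨j, hj, hjlt⟩ := index?_lt_of_mem pre d hdpre
        have hidx : PySem.List.index? (pre ++ node :: suf) d = some j := by
          rw [PySem.List.index?_append_of_mem _ hdpre, hj]
        rw [hidx]
        simp only [Option.getD_some, decide_eq_false_iff_not]
        omega
      · -- d not before node: it is in `remaining`, so B says it is absent
        left
        have hdmem : d ∈ pre.foldl PySem.Set.discard (PySem.Set.ofList deps) := by
          rw [mem_foldl_discard, PySem.Set.mem_ofList]; exact ⟨hddeps, hdpre⟩
        have hb := hB d hdmem
        simp only [Bool.not_eq_eq_eq_not, Bool.not_true] at hb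
        have hdnr : d ∉ pre ++ node :: suf := fun hmem => by
          rw [(PySem.Set.contains_iff _ d).mpr ((PySem.Set.mem_ofList _ d).mpr hmem)] at hb
          simp at hb
        simpa using hdnr
  · -- node absent: both sides are false
    have hcont : result.contains node = false := by simpa using h
    simp only [deps_before_py, deps_before_py_alt, hcont,
      sweepB_of_not_mem node result _ h, Bool.not_false, if_true]

-- ===== VERDICT (by name: the statement is the Claim_ definition above) =====
theorem deps_before_py_spec : Claim_equal_deps_before_py := by
  intro result node deps _
  exact deps_before_eq result node deps
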